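-- pv_equiv track=rewrite | github.com/longtomjr/project_euler | solutions/problem_002.py | fibonacci_max_n
-- ===== SOURCE A (Python) =====
-- def F(n: int) -> int:
--     """
--     Function that is a python version of the mathematical
--     function
--           {0 -            if n = 0;
--     F_n = {1 -            if n = 1;
--           {F_n-1 + F_n-2  if n > 1.
--
--     :param n: The term of the sequance you want
--     :returns: The n-th term of the fibonacci sequance
--     """
--     if n == 0:
--         return 0
--     elif n == 1:
--         return 1
--     else:
--         return F(n - 1) + F(n - 2)
--
-- def fibonacci_max_n(maximum: int) -> int:
--     """
--     Gets 'n' of the largest fibonacci number less than the max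
--
--     :param maximum: The number that may not be exeeded
--     :returns: 'n' of the largest number less than the max
--     """
--
--     n = 0
--     # Infinite loop that will continue until broken
--     while True:
--         # Makes 'n' larger until the fibonacci number is to large
--         if F(n) < maximum:
--             n = n + 1
--             continue
--         else:
--             # Return will break the loop
--             # This 'else' clause will only be reached once n is one to large
--             # therefore I can get the correct value of n by just subtracting 1
--             return n-1
-- ===== SOURCE B (Python) =====
-- def fibonacci_max_n(maximum: int) -> int:
--     n, a, b = 0, 0, 1
--     while a < maximum:
--         a, b = b, a + b
--         n += 1
--     return n - 1
-- ===== Notes on version B (the rewrite author's own statement) =====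
-- stated objective: faster
-- what changed: A recomputes F(n) from scratch with naive double recursion on every loop iteration; B advances a single running Fibonacci pair (a, b) until a >= maximum, doing one addition per step.
import Mathlib
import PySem

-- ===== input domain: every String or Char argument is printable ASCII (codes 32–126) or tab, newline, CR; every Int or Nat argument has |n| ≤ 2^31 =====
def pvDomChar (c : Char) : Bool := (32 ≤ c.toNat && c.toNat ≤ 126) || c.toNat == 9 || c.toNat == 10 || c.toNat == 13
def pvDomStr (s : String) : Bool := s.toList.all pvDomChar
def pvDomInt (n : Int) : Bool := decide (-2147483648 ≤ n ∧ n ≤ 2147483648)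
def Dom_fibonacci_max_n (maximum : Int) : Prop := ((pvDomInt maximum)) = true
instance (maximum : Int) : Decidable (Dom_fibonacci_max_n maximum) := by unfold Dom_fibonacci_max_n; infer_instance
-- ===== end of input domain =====

-- B recomputes nothing: it advances one running Fibonacci pair instead of re-running A's
-- naive doubly-recursive F(n) from scratch on every loop iteration (objective: faster).

-- ===== PORT A =====
-- Python's F, naive double recursion; A only ever calls it with n = 0, 1, 2, …
def pvF : Nat → Int
  | 0 => 0
  | 1 => 1
  | n + 2 => pvF (n + 1) + pvF n

-- A's `while True` loop.  The fuel argument is only a totality guard: Python's loop stops at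
-- the first n with F(n) ≥ maximum, and since F(n) ≥ n - 1 (Fibonacci) that n is at most
-- maximum.toNat + 1, so fuel maximum.toNat + 2 is never exhausted.
def pvLoopA (maximum : Int) : Nat → Nat → Int
  | 0, n => (n : Int) - 1
  | fuel + 1, n => if pvF n < maximum then pvLoopA maximum fuel (n + 1) else (n : Int) - 1

def fibonacci_max_n (maximum : Int) : Int := pvLoopA maximum (maximum.toNat + 2) 0

-- ===== PORT B =====
-- B's loop over the running pair (a, b); same totality fuel as above, never exhausted.
def pvLoopB (maximum : Int) : Nat → Nat → Int → Int → Int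
  | 0, n, _, _ => (n : Int) - 1
  | fuel + 1, n, a, b => if a < maximum then pvLoopB maximum fuel (n + 1) b (a + b) else (n : Int) - 1

def fibonacci_max_n_alt (maximum : Int) : Int := pvLoopB maximum (maximum.toNat + 2) 0 0 1

-- ===== PRECONDITION & SPEC =====
def Spec_fibonacci_max_n (maximum : Int) (out : Int) : Prop := out = fibonacci_max_n_alt maximum
instance (maximum : Int) (out : Int) : Decidable (Spec_fibonacci_max_n maximum out) := by unfold Spec_fibonacci_max_n; infer_instance

-- ===== CLAIM (what is proved, stated in full; the proofs are below) =====
def Claim_equal_fibonacci_max_n : Prop := ∀ (maximum : Int), Dom_fibonacci_max_n maximum → Spec_fibonacci_max_n maximum (fibonacci_max_n maximum)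

-- ===== LEMMAS AND PROOFS =====
-- B's pair is always a pair of consecutive Fibonacci values, so the two loops test the
-- same condition and stop at the same n, for ANY common fuel.
theorem pvLoopB_eq_pvLoopA (maximum : Int) (fuel : Nat) :
    ∀ (n : Nat) (a b : Int), a = pvF n → b = pvF (n + 1) →
      pvLoopB maximum fuel n a b = pvLoopA maximum fuel n := by
  induction fuel with
  | zero => intro n a b _ _; rfl
  | succ fuel ih =>
    intro n a b ha hb
    simp only [pvLoopB, pvLoopA, ha, hb]
    split_ifs with hlt
    · exact ih (n + 1) (pvF (n + 1)) (pvF n + pvF (n + 1))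
        rfl (by have : pvF (n + 1 + 1) = pvF (n + 1) + pvF n := rfl; omega)
    · rfl

-- ===== VERDICT (by name: the statement is the Claim_ definition above) =====
theorem fibonacci_max_n_spec : Claim_equal_fibonacci_max_n := by
  intro maximum _
  unfold Spec_fibonacci_max_n fibonacci_max_n fibonacci_max_n_alt
  exact (pvLoopB_eq_pvLoopA maximum (maximum.toNat + 2) 0 0 1 rfl rfl).symm
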